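-- pv_equiv track=rewrite | github.com/mnbplus/Skills | skills/resource-hunter/src/resource_hunter/packaging_report.py | _diagnostic_path_signature
-- ===== SOURCE A (Python) =====
-- def _diagnostic_path_signature(value: object) -> str | None:
--     detail = str(value or "").strip().strip("\"'")
--     if not detail:
--         return None
--     if not (
--         detail.startswith(("/", "\\"))
--         or (len(detail) >= 3 and detail[1] == ":" and detail[2] in ("/", "\\"))
--     ):
--         return None
--     normalized = detail.replace("\\", "/")
--     segments = [segment for segment in normalized.split("/") if segment and segment not in {".", ".."}]
--     if not segments:
--         return None
--     tail = "/".join(segments[-2:])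
--     return f"*/{tail}"
-- ===== SOURCE B (Python) =====
-- def _diagnostic_path_signature(value: object) -> str | None:
--     detail = str(value or "").strip().strip("\"'")
--     if not detail:
--         return None
--     if not (
--         detail.startswith(("/", "\\"))
--         or (len(detail) >= 3 and detail[1] == ":" and detail[2] in ("/", "\\"))
--     ):
--         return None
--     normalized = detail.replace("\\", "/")
--     buf = []
--     for segment in reversed(normalized.split("/")):
--         if segment and segment not in (".", ".."):
--             buf.append(segment)
--             if len(buf) == 2:
--                 break
--     if not buf:
--         return None
--     return "*/" + "/".join(reversed(buf))
-- ===== Notes on version B (the rewrite author's own statement) =====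
-- stated objective: alternative
-- what changed: Instead of materialising the full filtered segment list and slicing [-2:], B scans the split pieces from the right, collecting at most two valid segments and stopping early, then reverses the small buffer.
import Mathlib
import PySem

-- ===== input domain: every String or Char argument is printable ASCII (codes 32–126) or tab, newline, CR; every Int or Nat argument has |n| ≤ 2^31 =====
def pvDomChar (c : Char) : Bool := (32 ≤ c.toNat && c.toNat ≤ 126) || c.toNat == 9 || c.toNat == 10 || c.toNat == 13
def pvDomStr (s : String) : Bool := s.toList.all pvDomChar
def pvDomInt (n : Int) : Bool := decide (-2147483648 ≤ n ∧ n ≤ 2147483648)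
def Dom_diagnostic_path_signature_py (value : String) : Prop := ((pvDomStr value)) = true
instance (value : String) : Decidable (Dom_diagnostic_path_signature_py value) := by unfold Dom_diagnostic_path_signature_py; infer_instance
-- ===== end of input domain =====

-- B replaces A's full filtered-segment list and [-2:] slice by a right-to-left scan that
-- collects at most two valid segments and stops early (alternative decomposition, same cost).


-- shared tiny helpers (both Pythons test the identical guard and segment-validity condition)
def pvSegOk (seg : List Char) : Bool :=
  !seg.isEmpty && seg != ['.'] && seg != ['.', '.']

def pvGuard (detail : List Char) : Bool :=
  PySem.Chars.startswith detail ['/'] || PySem.Chars.startswith detail ['\\'] ||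
    (decide (3 ≤ detail.length) && (PySem.List.pyGet? detail 1 == some ':') &&
      (PySem.List.pyGet? detail 2 == some '/' || PySem.List.pyGet? detail 2 == some '\\'))

-- ===== PORT A =====
def diagnostic_path_signature_py (value : String) : Option String :=
  let detail := PySem.Chars.stripChars (PySem.Chars.strip value.toList) ['"', '\'']
  if detail.isEmpty then none
  else if !(pvGuard detail) then none
  else
    let normalized := PySem.Chars.replace detail ['\\'] ['/']
    let segments := (PySem.Chars.splitOn normalized ['/']).filter pvSegOk
    if segments.isEmpty then none
    else
      let tail := PySem.Chars.join ['/'] (PySem.List.slice segments (some (-2)) none)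
      some (String.ofList ('*' :: '/' :: tail))

-- ===== PORT B =====
-- right-to-left scan: append valid segments to buf, stop once two are collected
def pvCollect2 : List (List Char) → List (List Char) → List (List Char)
  | [], buf => buf
  | seg :: rest, buf =>
    if pvSegOk seg then
      let buf' := buf ++ [seg]
      if buf'.length = 2 then buf' else pvCollect2 rest buf'
    else pvCollect2 rest buf

def diagnostic_path_signature_py_alt (value : String) : Option String :=
  let detail := PySem.Chars.stripChars (PySem.Chars.strip value.toList) ['"', '\'']
  if detail.isEmpty then none
  else if !(pvGuard detail) then none
  else
    let normalized := PySem.Chars.replace detail ['\\'] ['/']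
    let buf := pvCollect2 (PySem.Chars.splitOn normalized ['/']).reverse []
    if buf.isEmpty then none
    else some (String.ofList ('*' :: '/' :: PySem.Chars.join ['/'] buf.reverse))

-- ===== PRECONDITION & SPEC =====
def Spec_diagnostic_path_signature_py (value : String) (out : Option String) : Prop := out = diagnostic_path_signature_py_alt value
instance (value : String) (out : Option String) : Decidable (Spec_diagnostic_path_signature_py value out) := by unfold Spec_diagnostic_path_signature_py; infer_instance

-- ===== CLAIM (what is proved, stated in full; the proofs are below) =====
def Claim_equal_diagnostic_path_signature_py : Prop := ∀ (value : String), Dom_diagnostic_path_signature_py value → Spec_diagnostic_path_signature_py value (diagnostic_path_signature_py value)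

-- ===== LEMMAS AND PROOFS =====

-- the scan collects the first two valid segments of its input, continuing a short buffer
theorem pvCollect2_eq (xs : List (List Char)) :
    ∀ buf, buf.length < 2 → pvCollect2 xs buf = ((buf ++ xs.filter pvSegOk).take 2) := by
  induction xs with
  | nil => intro buf h; simp [pvCollect2, List.take_of_length_le (Nat.le_of_lt h)]
  | cons seg rest ih =>
    intro buf h
    by_cases hs : pvSegOk seg
    · simp only [pvCollect2, hs, if_pos]
      by_cases h2 : (buf ++ [seg]).length = 2
      · simp only [h2, if_pos]
        rw [List.filter_cons_of_pos hs, show buf ++ seg :: List.filter pvSegOk rest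
              = (buf ++ [seg]) ++ List.filter pvSegOk rest by simp,
            List.take_append_of_le_length (by omega), List.take_of_length_le (by omega)]
      · have hlt : (buf ++ [seg]).length < 2 := by
          simp only [List.length_append, List.length_cons, List.length_nil] at h2 ⊢; omega
        rw [if_neg h2, ih _ hlt, List.filter_cons_of_pos hs]
        simp
    · simp only [pvCollect2, hs, if_neg, Bool.false_eq_true, not_false_iff]
      rw [ih _ h, List.filter_cons_of_neg (by simpa using hs)]

-- segments[-2:] equals the reversed two-from-the-right scan result
theorem pvTail_eq (ps : List (List Char)) :
    (pvCollect2 ps.reverse []).reverse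
      = PySem.List.slice (ps.filter pvSegOk) (some (-2)) none := by
  rw [pvCollect2_eq _ [] (by simp), PySem.List.slice_from_neg_ofNat _ 2 (by omega)]
  simp only [List.nil_append, List.filter_reverse]
  rw [List.take_reverse, List.reverse_reverse]

theorem pvCore (ps : List (List Char)) :
    (if (ps.filter pvSegOk).isEmpty then (none : Option String)
     else some (String.ofList ('*' :: '/' ::
       PySem.Chars.join ['/'] (PySem.List.slice (ps.filter pvSegOk) (some (-2)) none))))
    = (if (pvCollect2 ps.reverse []).isEmpty then none
       else some (String.ofList ('*' :: '/' ::
         PySem.Chars.join ['/'] (pvCollect2 ps.reverse []).reverse))) := by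
  have ht := pvTail_eq ps
  have he : (pvCollect2 ps.reverse []).isEmpty = (ps.filter pvSegOk).isEmpty := by
    rcases h : (ps.filter pvSegOk) with _ | ⟨a, l⟩
    · have : (pvCollect2 ps.reverse []).reverse = [] := by
        rw [ht, h]; simp [PySem.List.slice_from_neg_ofNat _ 2 (by omega)]
      simp_all
    · have hne : pvCollect2 ps.reverse [] ≠ [] := by
        intro hc
        have h2 := ht
        rw [hc, PySem.List.slice_from_neg_ofNat _ 2 (by omega), h] at h2
        have := congrArg List.length h2
        simp [List.length_drop] at this
        omega
      simp [hne]
  rw [ht] at *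
  rw [he]

theorem diagnostic_path_signature_py_spec : Claim_equal_diagnostic_path_signature_py := by
  intro value _
  unfold Spec_diagnostic_path_signature_py diagnostic_path_signature_py diagnostic_path_signature_py_alt
  set detail := PySem.Chars.stripChars (PySem.Chars.strip value.toList) ['"', '\''] with hd
  by_cases h1 : detail.isEmpty
  · simp [h1]
  · by_cases h2 : pvGuard detail
    · simp only [h1, h2, Bool.not_true, Bool.false_eq_true, if_neg, not_false_iff]
      exact pvCore _
    · simp [h1, h2]

-- ===== VERDICT (by name: the statement is the Claim_ definition above) =====
-- (the theorem above is the verdict)
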